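-- pv_equiv track=rewrite | github.com/CharlesterWide/CursoSinNombre | entregaEjerciciosPython/Artemisbasico/funciones.py | alturapiramide
-- ===== SOURCE A (Python) =====
-- def alturapiramide (numer):
--     caden = ""
--     for fila in range(1,numer + 1):
--         for esp in range(1,(numer - fila) + 1):
--             caden = caden + " "
--
--         for dec in range(fila, 0,-1):
--             caden = caden + str(dec)
--
--         for inc in range(2, fila+1 ,1):
--             caden = caden + str(inc)
--
--         caden = caden + "\n"
--     return(caden)
-- ===== SOURCE B (Python) =====
-- def alturapiramide(numer):
--     # one abs-indexed pass per row instead of separate descending/ascending loops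
--     return "".join(
--         " " * (numer - fila)
--         + "".join(str(1 + abs(j)) for j in range(-(fila - 1), fila))
--         + "\n"
--         for fila in range(1, numer + 1)
--     )
-- ===== Notes on version B (the rewrite author's own statement) =====
-- stated objective: simpler
-- what changed: A builds the string by mutating an accumulator through three separate inner loops per row (spaces, descending digits, ascending digits); B joins per-row strings, generating each row's digit run in one abs-indexed pass over a symmetric range and its padding with string repetition.
import Mathlib
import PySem

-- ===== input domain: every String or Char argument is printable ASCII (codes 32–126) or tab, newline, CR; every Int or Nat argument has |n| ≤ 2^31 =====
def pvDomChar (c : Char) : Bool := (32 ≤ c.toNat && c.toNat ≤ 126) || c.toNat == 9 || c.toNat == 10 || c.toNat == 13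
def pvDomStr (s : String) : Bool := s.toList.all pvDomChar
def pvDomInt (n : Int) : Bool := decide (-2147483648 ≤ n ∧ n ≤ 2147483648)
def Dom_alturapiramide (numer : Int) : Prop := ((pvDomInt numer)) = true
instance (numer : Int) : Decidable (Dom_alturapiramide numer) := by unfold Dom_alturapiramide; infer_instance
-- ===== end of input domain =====

-- B replaces A's three per-row appending loops by one abs-indexed comprehension per row,
-- joined into the result (objective: simpler decomposition, same cost).

-- ===== PORT A =====
def alturapiramide (numer : Int) : String :=
  (PySem.List.pyRange 1 (numer + 1) 1).foldl (fun caden fila =>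
    let caden := (PySem.List.pyRange 1 ((numer - fila) + 1) 1).foldl
      (fun caden _esp => caden ++ " ") caden
    let caden := (PySem.List.pyRange fila 0 (-1)).foldl
      (fun caden dec => caden ++ PySem.Int.toStr dec) caden
    let caden := (PySem.List.pyRange 2 (fila + 1) 1).foldl
      (fun caden inc => caden ++ PySem.Int.toStr inc) caden
    caden ++ "\n") ""

-- ===== PORT B =====
def alturapiramide_alt (numer : Int) : String :=
  PySem.Str.join "" ((PySem.List.pyRange 1 (numer + 1) 1).map (fun fila =>
    String.ofList (PySem.List.pyRepeat [' '] (numer - fila))   -- " " * (numer - fila), exact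
    ++ PySem.Str.join "" ((PySem.List.pyRange (-(fila - 1)) fila 1).map
        (fun j => PySem.Int.toStr (1 + |j|)))
    ++ "\n"))

-- ===== PRECONDITION & SPEC =====
def Spec_alturapiramide (numer : Int) (out : String) : Prop := out = alturapiramide_alt numer
instance (numer : Int) (out : String) : Decidable (Spec_alturapiramide numer out) := by unfold Spec_alturapiramide; infer_instance

-- ===== CLAIM (what is proved, stated in full; the proofs are below) =====
def Claim_equal_alturapiramide : Prop := ∀ (numer : Int), Dom_alturapiramide numer → Spec_alturapiramide numer (alturapiramide numer)

-- ===== LEMMAS AND PROOFS =====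

-- joining on the empty separator is flattening
theorem pvJoinNil (parts : List (List Char)) :
    PySem.Chars.join [] parts = parts.flatten := by
  induction parts with
  | nil => simp [PySem.Chars.join, List.intercalate]
  | cons p rest ih =>
    cases rest with
    | nil => simp [PySem.Chars.join, List.intercalate]
    | cons q r => rw [PySem.Chars.join_cons_cons]; simp_all

theorem pvEmptyToList : ("" : String).toList = [] := rfl

-- a string foldl that appends (g x) at each step, at the character level
theorem pvFoldAppend (g : Int → String) (l : List Int) (s : String) :
    (l.foldl (fun c x => c ++ g x) s).toList
      = s.toList ++ (l.map (fun x => (g x).toList)).flatten := by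
  induction l generalizing s with
  | nil => simp
  | cons x t ih => simp [ih, List.append_assoc]

-- the blanks loop writes (numer - f) spaces
theorem pvSpaces (l : List Int) :
    (l.map (fun _ => (" " : String).toList)).flatten = List.replicate l.length ' ' := by
  induction l with
  | nil => simp
  | cons x t ih =>
    simp only [List.map_cons, List.flatten_cons, List.length_cons, List.replicate_succ, ih]
    rfl

-- the digit run of row f: descending f..1 then ascending 2..f is one abs-indexed range
theorem pvDigitsRow (f : Int) (hf : 1 ≤ f) :
    PySem.List.pyRange f 0 (-1) ++ PySem.List.pyRange 2 (f + 1) 1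
      = (PySem.List.pyRange (-(f - 1)) f 1).map (fun j => 1 + |j|) := by
  rw [PySem.List.pyRange_neg_one, PySem.List.pyRange_one, PySem.List.pyRange_one]
  apply List.ext_getElem
  · simp; omega
  · intro i h1 h2
    simp only [List.getElem_append, List.getElem_map, List.getElem_range,
      List.length_map, List.length_range]
    split_ifs with h
    · rw [abs_of_nonpos (by omega)]
      omega
    · simp only [not_lt] at h
      rw [abs_of_nonneg (by omega)]
      omega

-- one step of A's outer loop appends exactly B's row string
theorem pvRowStep (numer f : Int) (hf : 1 ≤ f) (s : String) :
    ((((PySem.List.pyRange 1 ((numer - f) + 1) 1).foldl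
        (fun caden _esp => caden ++ " ") s
      |> fun c => (PySem.List.pyRange f 0 (-1)).foldl
        (fun caden dec => caden ++ PySem.Int.toStr dec) c)
      |> fun c => (PySem.List.pyRange 2 (f + 1) 1).foldl
        (fun caden inc => caden ++ PySem.Int.toStr inc) c) ++ "\n").toList
    = s.toList ++
      (String.ofList (PySem.List.pyRepeat [' '] (numer - f))
        ++ PySem.Str.join "" ((PySem.List.pyRange (-(f - 1)) f 1).map
            (fun j => PySem.Int.toStr (1 + |j|)))
        ++ "\n").toList := by
  simp only []
  rw [String.toList_append, pvFoldAppend, pvFoldAppend, pvFoldAppend]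
  rw [String.toList_append, String.toList_append, PySem.Str.toList_join,
    pvEmptyToList, pvJoinNil]
  have hsp : ((PySem.List.pyRange 1 (numer - f + 1) 1).map
      (fun _ => (" " : String).toList)).flatten
      = (String.ofList (PySem.List.pyRepeat [' '] (numer - f))).toList := by
    rw [pvSpaces, String.toList_ofList, PySem.List.pyRepeat_singleton,
      PySem.List.length_pyRange_one]
    norm_num
  have hdig : ((PySem.List.pyRange f 0 (-1)).map
        (fun x => (PySem.Int.toStr x).toList)).flatten
      ++ ((PySem.List.pyRange 2 (f + 1) 1).map
        (fun x => (PySem.Int.toStr x).toList)).flatten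
      = (((PySem.List.pyRange (-(f - 1)) f 1).map
          (fun j => PySem.Int.toStr (1 + |j|))).map String.toList).flatten := by
    rw [← List.flatten_append, ← List.map_append, pvDigitsRow f hf, List.map_map,
      List.map_map]
    simp [Function.comp_def, PySem.Int.toList_toStr]
  rw [← hsp, ← hdig]
  simp [List.append_assoc]

-- A's outer fold produces exactly the concatenation of B's row strings
theorem pvOuter (numer : Int) (l : List Int) (hl : ∀ x ∈ l, 1 ≤ x) (s : String) :
    (l.foldl (fun caden fila =>
      let caden := (PySem.List.pyRange 1 ((numer - fila) + 1) 1).foldl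
        (fun caden _esp => caden ++ " ") caden
      let caden := (PySem.List.pyRange fila 0 (-1)).foldl
        (fun caden dec => caden ++ PySem.Int.toStr dec) caden
      let caden := (PySem.List.pyRange 2 (fila + 1) 1).foldl
        (fun caden inc => caden ++ PySem.Int.toStr inc) caden
      caden ++ "\n") s).toList
    = s.toList ++ ((l.map (fun fila =>
        String.ofList (PySem.List.pyRepeat [' '] (numer - fila))
        ++ PySem.Str.join "" ((PySem.List.pyRange (-(fila - 1)) fila 1).map
            (fun j => PySem.Int.toStr (1 + |j|)))
        ++ "\n")).map String.toList).flatten := by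
  induction l generalizing s with
  | nil => simp
  | cons x t ih =>
    simp only [List.foldl_cons, List.map_cons, List.flatten_cons]
    rw [ih (fun y hy => hl y (List.mem_cons_of_mem _ hy))]
    rw [pvRowStep numer x (hl x (List.mem_cons_self)) s]
    simp [List.append_assoc]

-- ===== VERDICT (by name: the statement is the Claim_ definition above) =====
theorem alturapiramide_spec : Claim_equal_alturapiramide := by
  intro numer _
  unfold Spec_alturapiramide alturapiramide alturapiramide_alt
  apply String.toList_inj.mp
  rw [PySem.Str.toList_join, pvEmptyToList, pvJoinNil]
  rw [pvOuter numer _ (fun x hx => (PySem.List.mem_pyRange_one.mp hx).1) ""]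
  simp
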